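-- pv_equiv track=rewrite | github.com/kovr-ai/kovr-aws-nist-compliance | src/enhanced_executor.py | _group_by_service
-- ===== SOURCE A (Python) =====
-- from typing import Any, Dict, List, Optional, Set
--
-- def _group_by_service(
--
--     checks: List[Dict[str, Any]]
-- ) -> Dict[str, List[Dict[str, Any]]]:
--     """Group checks by AWS service."""
--     groups = {}
--     for check in checks:
--         service = check['service']
--         if service not in groups:
--             groups[service] = []
--         groups[service].append(check)
--     return groups
-- ===== SOURCE B (Python) =====
-- def _group_by_service(checks):
--     """Group checks by AWS service: dedup the service keys in first-occurrence
--     order, then build each group by filtering the whole list per service."""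
--     order = list(dict.fromkeys(c['service'] for c in checks))
--     return {s: [c for c in checks if c['service'] == s] for s in order}
-- ===== Notes on version B (the rewrite author's own statement) =====
-- stated objective: alternative
-- what changed: Replaces the single hash-insertion pass that grows group lists in place by a two-phase decomposition: dedup the service keys in first-occurrence order, then build each group's list with a filter comprehension over the whole input.
import Mathlib
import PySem

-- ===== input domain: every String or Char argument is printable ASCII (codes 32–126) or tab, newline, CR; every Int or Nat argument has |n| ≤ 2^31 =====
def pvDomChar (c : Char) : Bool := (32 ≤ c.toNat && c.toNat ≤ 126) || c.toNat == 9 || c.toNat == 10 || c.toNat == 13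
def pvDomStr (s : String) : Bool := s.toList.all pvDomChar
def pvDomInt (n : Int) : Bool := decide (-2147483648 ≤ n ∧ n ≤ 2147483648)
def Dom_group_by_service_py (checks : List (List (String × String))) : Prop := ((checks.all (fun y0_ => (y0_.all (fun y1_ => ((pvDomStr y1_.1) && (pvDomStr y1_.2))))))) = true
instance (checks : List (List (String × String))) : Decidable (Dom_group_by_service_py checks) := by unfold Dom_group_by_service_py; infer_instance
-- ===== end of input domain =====

-- B replaces A's single hash-insertion pass by a different decomposition (dedup the
-- service keys in order, then filter the list once per service); same return value.

-- ===== PORT A =====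
-- check['service'] (a KeyError when absent, excluded by Pre_): total form getD under Pre_
def pvService (check : List (String × String)) : String :=
  (PySem.Dict.mk check).getD "service" ""

def group_by_service_py (checks : List (List (String × String))) : List (String × List (List (String × String))) :=
  (checks.foldl (fun groups check =>
      let service := pvService check
      let groups := if groups.contains service then groups
                    else groups.insert service ([] : List (List (String × String)))
      groups.modify service [] (fun l => l ++ [check]))
    PySem.Dict.empty).items

-- ===== PORT B =====
def group_by_service_py_alt (checks : List (List (String × String))) : List (String × List (List (String × String))) :=
  let order := PySem.List.dedup (checks.map pvService)
  order.map (fun s => (s, checks.filter (fun c => pvService c == s)))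

-- ===== PRECONDITION & SPEC =====
-- Pre_ excludes exactly the inputs where A raises KeyError: a check without a 'service' key.
def Pre_group_by_service_py (checks : List (List (String × String))) : Prop :=
  checks.all (fun c => (PySem.Dict.mk c).contains "service") = true
instance (checks : List (List (String × String))) : Decidable (Pre_group_by_service_py checks) := by unfold Pre_group_by_service_py; infer_instance

def pvWitness_group_by_service_py : (List (List (String × String))) :=
  [[("service", "ec2"), ("id", "1")], [("service", "s3")], [("service", "ec2"), ("id", "2")]]

def Spec_group_by_service_py (checks : List (List (String × String))) (out : List (String × List (List (String × String)))) : Prop := out = group_by_service_py_alt checks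
instance (checks : List (List (String × String))) (out : List (String × List (List (String × String)))) : Decidable (Spec_group_by_service_py checks out) := by unfold Spec_group_by_service_py; infer_instance

-- ===== CLAIM (what is proved, stated in full; the proofs are below) =====
def Claim_equal_group_by_service_py : Prop := ∀ (checks : List (List (String × String))), Dom_group_by_service_py checks → Pre_group_by_service_py checks → Spec_group_by_service_py checks (group_by_service_py checks)

-- ===== LEMMAS AND PROOFS =====

-- A's loop body ("if absent: groups[s] = []; groups[s].append(check)") is one modify.
lemma step_eq_modify (g : PySem.Dict String (List (List (String × String))))
    (c : List (String × String)) :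
    (if g.contains (pvService c) then g
     else g.insert (pvService c) ([] : List (List (String × String)))).modify
      (pvService c) [] (fun l => l ++ [c])
    = g.modify (pvService c) [] (fun l => l ++ [c]) := by
  by_cases h : g.contains (pvService c) = true
  · rw [if_pos h]
  · rw [if_neg h]
    have hf : g.contains (pvService c) = false := by
      simpa using h
    simp only [PySem.Dict.modify, PySem.Dict.getD_insert_self,
      PySem.Dict.insert_insert_self, PySem.Dict.getD_of_not_contains _ _ hf]

lemma fold_eq (checks : List (List (String × String))) :
    checks.foldl (fun g c => g.modify (pvService c) [] (fun l => l ++ [c]))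
      PySem.Dict.empty
    = (checks.map (fun c => (pvService c, c))).foldl
        (fun g p => g.modify p.1 [] (fun l => l ++ [p.2])) PySem.Dict.empty := by
  rw [List.foldl_map]

-- ===== VERDICT (by name: the statement is the Claim_ definition above) =====

theorem group_by_service_py_spec : Claim_equal_group_by_service_py := by
  intro checks _ _
  unfold Spec_group_by_service_py group_by_service_py group_by_service_py_alt
  simp only []
  have hstep : checks.foldl (fun groups check =>
      let service := pvService check
      let groups := if groups.contains service then groups
                    else groups.insert service ([] : List (List (String × String)))
      groups.modify service [] (fun l => l ++ [check])) PySem.Dict.empty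
      = checks.foldl (fun g c => g.modify (pvService c) [] (fun l => l ++ [c]))
          PySem.Dict.empty := by
    apply PySem.List.foldl_congr_mem
    intro g c _
    exact step_eq_modify g c
  rw [hstep]
  set d := checks.foldl (fun g c => g.modify (pvService c) [] (fun l => l ++ [c]))
      PySem.Dict.empty with hd
  have hnodup : d.keys.Nodup := by
    rw [hd]
    exact PySem.Dict.nodup_keys_foldl_modify_key checks pvService []
      (fun g c l => l ++ [c]) PySem.Dict.empty PySem.Dict.nodup_keys_empty
  have hkeys : d.keys = PySem.List.dedup (checks.map pvService) := by
    rw [hd, PySem.Dict.keys_foldl_modify_key, PySem.Dict.keys_empty,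
      PySem.List.dedup_eq_ofList]
    rfl
  have hgetD : ∀ s, d.getD s [] = checks.filter (fun c => pvService c == s) := by
    intro s
    rw [hd, fold_eq, PySem.Dict.getD_foldl_modify_append, PySem.Dict.getD_empty,
      List.filter_map, List.map_map]
    simp [Function.comp_def]
  rw [PySem.Dict.items_eq_map_keys d hnodup [], hkeys]
  apply List.map_congr_left
  intro s _
  rw [hgetD s]
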